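-- pv_equiv track=rewrite | github.com/edaaydinea/HackerRank | The HackerRank Interview Preparation Kit/14 - Graphs/Roads and Libraries.py | getCostAndBuildRoad
-- ===== SOURCE A (Python) =====
-- def getCostAndBuildRoad(node, graph, visited, c_road):
--     cost = 0
--     for near_node in graph[node]:
--         if not visited[near_node]:
--             visited[near_node] = True
--             cost += c_road
--             cost += getCostAndBuildRoad(near_node, graph, visited, c_road)
--     return cost
-- ===== SOURCE B (Python) =====
-- def getCostAndBuildRoad(node, graph, visited, c_road):
--     cost = 0
--     stack = [list(graph[node])]
--     while stack:
--         frame = stack[-1]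
--         if not frame:
--             stack.pop()
--             continue
--         near = frame.pop(0)
--         if not visited[near]:
--             visited[near] = True
--             cost += c_road
--             stack.append(list(graph[near]))
--     return cost
-- ===== Notes on version B (the rewrite author's own statement) =====
-- stated objective: alternative
-- what changed: The recursive DFS is replaced by an iterative loop over an explicit stack of pending neighbour lists (same traversal order, same marking discipline), removing recursion entirely.
import Mathlib
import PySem

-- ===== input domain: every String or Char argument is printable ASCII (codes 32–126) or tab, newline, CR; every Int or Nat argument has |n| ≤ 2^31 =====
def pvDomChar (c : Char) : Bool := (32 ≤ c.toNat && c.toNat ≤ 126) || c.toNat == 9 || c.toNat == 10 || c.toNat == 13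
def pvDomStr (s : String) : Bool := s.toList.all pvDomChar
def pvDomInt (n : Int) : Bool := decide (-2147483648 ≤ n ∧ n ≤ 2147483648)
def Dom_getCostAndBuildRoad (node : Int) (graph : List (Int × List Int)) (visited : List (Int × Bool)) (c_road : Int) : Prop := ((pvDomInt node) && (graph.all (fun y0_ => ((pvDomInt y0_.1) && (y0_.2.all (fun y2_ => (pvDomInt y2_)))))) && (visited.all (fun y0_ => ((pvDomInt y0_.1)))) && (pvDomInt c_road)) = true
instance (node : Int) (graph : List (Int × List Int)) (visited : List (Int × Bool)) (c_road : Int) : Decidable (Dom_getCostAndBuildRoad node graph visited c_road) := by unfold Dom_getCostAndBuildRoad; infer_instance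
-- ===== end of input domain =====

-- ===== PORT A =====
-- B rewrites A's recursive DFS as an iterative loop over an explicit stack of pending
-- neighbour lists (same traversal order); both Pythons mutate `visited` identically, and
-- the equivalence proved here is about the return value.

-- number of still-unvisited entries (termination measure for both ports)
def cntF (d : PySem.Dict Int Bool) : Nat := d.items.countP (fun p => p.2 == false)

theorem cntF_map_le (l : List (Int × Bool)) (k : Int) :
    (l.map (fun p => if p.1 == k then (k, true) else p)).countP (fun p => p.2 == false)
      ≤ l.countP (fun p => p.2 == false) := by
  rw [List.countP_map]
  apply List.countP_mono_left
  intro a _ hpa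
  by_cases hk : (a.1 == k) = true
  · simp only [Function.comp_apply, hk, if_true] at hpa
    exact absurd hpa (by decide)
  · simpa only [Function.comp_apply, hk, if_false, Bool.false_eq_true] using hpa

theorem cntF_find_lt (l : List (Int × Bool)) (k : Int)
    (h : (l.find? (fun p => p.1 == k)).map Prod.snd = some false) :
    (l.map (fun p => if p.1 == k then (k, true) else p)).countP (fun p => p.2 == false)
      < l.countP (fun p => p.2 == false) := by
  induction l with
  | nil => simp at h
  | cons p t ih =>
    by_cases hk : (p.1 == k) = true
    · have hfind : List.find? (fun p => p.1 == k) (p :: t) = some p :=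
        List.find?_cons_of_pos hk
      rw [hfind] at h
      simp only [Option.map_some, Option.some.injEq] at h
      rw [List.map_cons, List.countP_cons, List.countP_cons, if_pos hk, h]
      have hle := cntF_map_le t k
      simp only [show (((k, true) : Int × Bool).2 == false) = false from rfl,
        show ((false : Bool) == false) = true from rfl, Bool.false_eq_true, if_false, if_true]
      omega
    · have hfind : List.find? (fun p => p.1 == k) (p :: t) = List.find? (fun p => p.1 == k) t :=
        List.find?_cons_of_neg hk
      rw [hfind] at h
      have := ih h
      rw [List.map_cons, List.countP_cons, List.countP_cons, if_neg hk]
      by_cases hv : (p.2 == false) = true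
      · rw [if_pos hv]; omega
      · rw [if_neg hv]; omega

theorem cntF_insert_lt (d : PySem.Dict Int Bool) (k : Int) (h : d.get? k = some false) :
    cntF (d.insert k true) < cntF d := by
  have hc : d.contains k = true := by
    rw [PySem.Dict.contains_eq_isSome_get?, h]; rfl
  unfold cntF PySem.Dict.insert
  rw [if_pos hc]
  exact cntF_find_lt d.items k (by simpa [PySem.Dict.get?] using h)

-- A's DFS: process the neighbour list of the current node left to right; on an unvisited
-- neighbour, mark it, add c_road, recurse, then continue with the remaining neighbours.
-- The result carries the invariant cntF (result.2) ≤ cntF vis, needed for termination.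
def goA (graph : PySem.Dict Int (List Int)) (c : Int) :
    (l : List Int) → (vis : PySem.Dict Int Bool) →
      {p : Int × PySem.Dict Int Bool // cntF p.2 ≤ cntF vis}
  | [], vis => ⟨(0, vis), le_refl _⟩
  | near :: rest, vis =>
    match h : vis.get? near with
    | some false =>
      let vis' := vis.insert near true
      let r1 := goA graph c ((graph.get? near).getD []) vis'
      let r2 := goA graph c rest r1.val.2
      ⟨(c + r1.val.1 + r2.val.1, r2.val.2),
        le_trans r2.property (le_trans r1.property (le_of_lt (cntF_insert_lt vis near h)))⟩
    | some true => goA graph c rest vis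
    | none => goA graph c rest vis    -- Python raises KeyError here; excluded by Pre_
  termination_by l vis => (cntF vis, l.length)
  decreasing_by
  all_goals first
    | exact Prod.Lex.left _ _ (cntF_insert_lt vis near h)
    | exact Prod.Lex.left _ _ (lt_of_le_of_lt r1.property (cntF_insert_lt vis near h))
    | exact Prod.Lex.right _ (Nat.lt_succ_self _)

def getCostAndBuildRoad (node : Int) (graph : List (Int × List Int)) (visited : List (Int × Bool)) (c_road : Int) : Int :=
  (goA (PySem.Dict.mk graph) c_road
    (((PySem.Dict.mk graph).get? node).getD []) (PySem.Dict.mk visited)).val.1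

-- ===== PORT B =====
-- B's loop: the stack holds the not-yet-processed remainder of each frame's neighbour list.
def loopB (graph : PySem.Dict Int (List Int)) (c : Int) :
    (stack : List (List Int)) → (vis : PySem.Dict Int Bool) → (cost : Int) → Int
  | [], _, cost => cost
  | [] :: rest, vis, cost => loopB graph c rest vis cost
  | (near :: r) :: rest, vis, cost =>
    match h : vis.get? near with
    | some false =>
      loopB graph c (((graph.get? near).getD []) :: r :: rest) (vis.insert near true) (cost + c)
    | some true => loopB graph c (r :: rest) vis cost
    | none => loopB graph c (r :: rest) vis cost    -- Python raises KeyError here; excluded by Pre_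
  termination_by stack vis _ => (cntF vis, (stack.map List.length).sum + stack.length)
  decreasing_by
  all_goals first
    | exact Prod.Lex.left _ _ (cntF_insert_lt vis near h)
    | exact Prod.Lex.right _ (by simp only [List.map_cons, List.sum_cons, List.length_cons]; omega)

def getCostAndBuildRoad_alt (node : Int) (graph : List (Int × List Int)) (visited : List (Int × Bool)) (c_road : Int) : Int :=
  loopB (PySem.Dict.mk graph) c_road
    [((PySem.Dict.mk graph).get? node).getD []] (PySem.Dict.mk visited) 0

-- ===== PRECONDITION & SPEC =====
-- the adjacency list of m (empty if m is not a key of graph)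
def pvAdj (graph : List (Int × List Int)) (m : Int) : List Int :=
  ((PySem.Dict.mk graph).get? m).getD []

-- m is initially unvisited (visited[m] is False)
def pvFalse0 (visited : List (Int × Bool)) (m : Int) : Bool :=
  (PySem.Dict.mk visited).get? m == some false

-- the nodes reachable from node through initially-unvisited nodes (closure iteration;
-- it stabilises within visited.length steps, as each step of a path is a distinct
-- unvisited node)
def pvReach (graph : List (Int × List Int)) (visited : List (Int × Bool)) (node : Int) : List Int :=
  (fun S => (S ++ (S.flatMap (pvAdj graph)).filter (pvFalse0 visited)).dedup)^[visited.length + 1] [node]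

-- Pre_ excludes exactly the inputs on which A raises KeyError: node must be a key of
-- graph, and every node it expands (node, plus every initially-unvisited node reachable
-- from it through initially-unvisited nodes) must itself be a key of graph with all its
-- neighbours keys of visited.
def Pre_getCostAndBuildRoad (node : Int) (graph : List (Int × List Int)) (visited : List (Int × Bool)) (c_road : Int) : Prop :=
  node ∈ graph.map Prod.fst ∧
  ∀ m ∈ pvReach graph visited node,
    m ∈ graph.map Prod.fst ∧ ∀ b ∈ pvAdj graph m, b ∈ visited.map Prod.fst

instance (node : Int) (graph : List (Int × List Int)) (visited : List (Int × Bool)) (c_road : Int) : Decidable (Pre_getCostAndBuildRoad node graph visited c_road) := by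
  unfold Pre_getCostAndBuildRoad; infer_instance

def pvWitness_getCostAndBuildRoad : Int × (List (Int × List Int)) × (List (Int × Bool)) × Int :=
  (0, [(0, [1]), (1, [0])], [(0, true), (1, false)], 2)

def Spec_getCostAndBuildRoad (node : Int) (graph : List (Int × List Int)) (visited : List (Int × Bool)) (c_road : Int) (out : Int) : Prop := out = getCostAndBuildRoad_alt node graph visited c_road
instance (node : Int) (graph : List (Int × List Int)) (visited : List (Int × Bool)) (c_road : Int) (out : Int) : Decidable (Spec_getCostAndBuildRoad node graph visited c_road out) := by unfold Spec_getCostAndBuildRoad; infer_instance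

-- ===== CLAIM (what is proved, stated in full; the proofs are below) =====
def Claim_equal_getCostAndBuildRoad : Prop := ∀ (node : Int) (graph : List (Int × List Int)) (visited : List (Int × Bool)) (c_road : Int), Dom_getCostAndBuildRoad node graph visited c_road → Pre_getCostAndBuildRoad node graph visited c_road → Spec_getCostAndBuildRoad node graph visited c_road (getCostAndBuildRoad node graph visited c_road)

-- ===== LEMMAS AND PROOFS =====

-- sequential runs of A's DFS over a list of neighbour lists, threading visited
def chainA (graph : PySem.Dict Int (List Int)) (c : Int) :
    List (List Int) → PySem.Dict Int Bool → Int × PySem.Dict Int Bool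
  | [], vis => (0, vis)
  | l :: rest, vis =>
    let r1 := goA graph c l vis
    let r2 := chainA graph c rest r1.val.2
    (r1.val.1 + r2.1, r2.2)

theorem goA_nil (graph : PySem.Dict Int (List Int)) (c : Int) (vis : PySem.Dict Int Bool) :
    (goA graph c [] vis).val = (0, vis) := by
  rw [goA]

theorem goA_cons_false (graph : PySem.Dict Int (List Int)) (c : Int) (near : Int)
    (rest : List Int) (vis : PySem.Dict Int Bool) (h : vis.get? near = some false) :
    (goA graph c (near :: rest) vis).val =
      (c + (goA graph c ((graph.get? near).getD []) (vis.insert near true)).val.1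
         + (goA graph c rest (goA graph c ((graph.get? near).getD []) (vis.insert near true)).val.2).val.1,
       (goA graph c rest (goA graph c ((graph.get? near).getD []) (vis.insert near true)).val.2).val.2) := by
  rw [goA]
  split
  · rfl
  · rename_i heq; rw [h] at heq; cases heq
  · rename_i heq; rw [h] at heq; cases heq

theorem goA_cons_skip (graph : PySem.Dict Int (List Int)) (c : Int) (near : Int)
    (rest : List Int) (vis : PySem.Dict Int Bool) (h : vis.get? near ≠ some false) :
    (goA graph c (near :: rest) vis).val = (goA graph c rest vis).val := by
  rw [goA]
  split
  · rename_i heq; exact absurd heq h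
  · rfl
  · rfl

theorem loopB_eq_chainA (graph : PySem.Dict Int (List Int)) (c : Int)
    (stack : List (List Int)) (vis : PySem.Dict Int Bool) (cost : Int) :
    loopB graph c stack vis cost = cost + (chainA graph c stack vis).1 := by
  induction stack, vis, cost using loopB.induct graph c with
  | case1 vis cost => simp [loopB, chainA]
  | case2 rest vis cost ih =>
    rw [loopB, ih]
    simp only [chainA, goA_nil]
    omega
  | case3 near r rest vis cost h ih =>
    rw [loopB]; rw [h]; rw [ih]
    simp only [chainA, goA_cons_false graph c near r vis h]
    omega
  | case4 near r rest vis cost h ih =>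
    rw [loopB]; rw [h]; rw [ih]
    simp only [chainA, goA_cons_skip graph c near r vis (by rw [h]; simp)]
  | case5 near r rest vis cost h ih =>
    rw [loopB]; rw [h]; rw [ih]
    simp only [chainA, goA_cons_skip graph c near r vis (by rw [h]; simp)]

theorem ports_agree (node : Int) (graph : List (Int × List Int)) (visited : List (Int × Bool)) (c_road : Int) :
    getCostAndBuildRoad node graph visited c_road = getCostAndBuildRoad_alt node graph visited c_road := by
  unfold getCostAndBuildRoad getCostAndBuildRoad_alt
  rw [loopB_eq_chainA]
  simp only [chainA]
  omega

-- ===== VERDICT (by name: the statement is the Claim_ definition above) =====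
theorem getCostAndBuildRoad_spec : Claim_equal_getCostAndBuildRoad := by
  intro node graph visited c_road _ _
  unfold Spec_getCostAndBuildRoad
  exact ports_agree node graph visited c_road
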